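-- pv_equiv track=rewrite | github.com/LukiLenkiewicz/UNICORN-MAML | rename_labels.py | change_labels
-- ===== SOURCE A (Python) =====
-- def change_labels(labels):
--     new_labels = []
--     current_label = labels[0]
--     current_new_label = 0
--     for label in labels:
--         if label != current_label:
--             current_new_label += 1
--             current_label = label
--
--         new_labels.append(current_new_label)
--
--     return new_labels
-- ===== SOURCE B (Python) =====
-- def change_labels(labels):
--     # Run-length decomposition: collapse labels into maximal runs of equal
--     # consecutive values, then emit each run's index repeated by its length.
--     runs = []
--     for x in labels:
--         if runs and runs[-1][0] == x:
--             runs[-1][1] += 1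
--         else:
--             runs.append([x, 1])
--     out = []
--     for i, (_, n) in enumerate(runs):
--         out += [i] * n
--     return out
-- ===== Notes on version B (the rewrite author's own statement) =====
-- stated objective: alternative
-- what changed: B first compresses the list into maximal runs (value,length) and then expands enumerated run indices, instead of A's per-element tracking of current_label/current_new_label; B also returns [] on empty input where A raises.
-- outside the precondition, e.g. on change_labels([]): A raises IndexError, B returns []
import Mathlib
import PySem

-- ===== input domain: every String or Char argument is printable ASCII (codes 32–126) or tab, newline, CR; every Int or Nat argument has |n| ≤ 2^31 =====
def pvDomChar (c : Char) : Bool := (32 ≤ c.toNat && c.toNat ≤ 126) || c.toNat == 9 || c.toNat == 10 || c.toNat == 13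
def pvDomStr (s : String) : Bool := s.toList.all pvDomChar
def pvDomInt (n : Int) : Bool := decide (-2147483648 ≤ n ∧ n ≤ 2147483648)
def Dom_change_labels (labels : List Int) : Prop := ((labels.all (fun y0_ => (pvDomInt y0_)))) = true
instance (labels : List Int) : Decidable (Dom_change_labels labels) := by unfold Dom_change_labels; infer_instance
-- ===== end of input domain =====

-- B replaces A's per-element label tracking with run-length compression then expansion
-- of enumerated run indices (alternative decomposition); on [] A raises, B returns [].


-- ===== PORT A =====
-- A's loop body: state (new_labels, current_label, current_new_label).
def cl_stepA (st : List Int × Int × Int) (label : Int) : List Int × Int × Int :=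
  if label ≠ st.2.1 then (st.1 ++ [st.2.2 + 1], label, st.2.2 + 1)
  else (st.1 ++ [st.2.2], st.2.1, st.2.2)

-- A: current_label := first element (IndexError on the empty list); one pass appending current_new_label.
def change_labels (labels : List Int) : List Int :=
  match labels.head? with
  | none => []  -- unreachable under Pre_ (Python raises IndexError here)
  | some h => (labels.foldl cl_stepA ([], h, 0)).1

-- ===== PORT B =====
-- B step 1: build runs (value, length), incrementing the last run in place.
def cl_stepB (runs : List (Int × Nat)) (x : Int) : List (Int × Nat) :=
  match runs.getLast? with
  | some (v, n) => if v == x then runs.dropLast ++ [(v, n + 1)] else runs ++ [(x, 1)]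
  | none => runs ++ [(x, 1)]

def cl_buildRuns (labels : List Int) : List (Int × Nat) :=
  labels.foldl cl_stepB []

def change_labels_alt (labels : List Int) : List Int :=
  ((cl_buildRuns labels).zipIdx.foldl
    (fun (out : List Int) (p : (Int × Nat) × Nat) => out ++ List.replicate p.1.2 (p.2 : Int))
    [])

-- ===== PRECONDITION & SPEC =====
-- Pre_ excludes only the empty list, on which A raises IndexError reading the first element.
def Pre_change_labels (labels : List Int) : Prop := labels ≠ []
instance (labels : List Int) : Decidable (Pre_change_labels labels) := by unfold Pre_change_labels; infer_instance
def pvWitness_change_labels : List Int := [3, 3, 1, 7]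

def Spec_change_labels (labels : List Int) (out : List Int) : Prop := out = change_labels_alt labels
instance (labels : List Int) (out : List Int) : Decidable (Spec_change_labels labels out) := by unfold Spec_change_labels; infer_instance

-- ===== CLAIM (what is proved, stated in full; the proofs are below) =====
def Claim_equal_change_labels : Prop := ∀ (labels : List Int), Dom_change_labels labels → Pre_change_labels labels → Spec_change_labels labels (change_labels labels)

-- ===== LEMMAS AND PROOFS =====

-- canonical per-element relabelling (reference for both sides)
def cl_g (cur : Int) (k : Int) : List Int → List Int
  | [] => []
  | x :: xs => if x ≠ cur then (k + 1) :: cl_g x (k + 1) xs else k :: cl_g cur k xs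

-- canonical run extension (what B's foldl does to its last run)
def cl_ext (cur : Int) (n : Nat) : List Int → List (Int × Nat)
  | [] => [(cur, n)]
  | x :: xs => if x = cur then cl_ext cur (n + 1) xs else (cur, n) :: cl_ext x 1 xs

-- canonical expansion with a starting index
def cl_expK (k : Nat) : List (Int × Nat) → List Int
  | [] => []
  | (_, n) :: rs => List.replicate n (k : Int) ++ cl_expK (k + 1) rs

theorem cl_foldA (l : List Int) : ∀ (acc : List Int) (cur k : Int),
    (l.foldl cl_stepA (acc, cur, k)).1 = acc ++ cl_g cur k l := by
  induction l with
  | nil => intro acc cur k; simp [cl_g]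
  | cons x xs ih =>
    intro acc cur k
    by_cases hx : x = cur
    · rw [List.foldl_cons, show cl_stepA (acc, cur, k) x = (acc ++ [k], cur, k) from by
        simp [cl_stepA, hx], ih, cl_g, if_neg (by simp [hx])]
      simp
    · rw [List.foldl_cons, show cl_stepA (acc, cur, k) x = (acc ++ [k + 1], x, k + 1) from by
        simp [cl_stepA, hx], ih, cl_g, if_pos hx]
      simp

theorem cl_foldB (l : List Int) : ∀ (R : List (Int × Nat)) (cur : Int) (n : Nat),
    (l.foldl cl_stepB (R ++ [(cur, n)])) = R ++ cl_ext cur n l := by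
  induction l with
  | nil => intro R cur n; simp [cl_ext]
  | cons x xs ih =>
    intro R cur n
    by_cases hx : x = cur
    · rw [List.foldl_cons, show cl_stepB (R ++ [(cur, n)]) x = R ++ [(cur, n + 1)] from by
        simp [cl_stepB, hx], ih, cl_ext, if_pos hx]
    · rw [List.foldl_cons, show cl_stepB (R ++ [(cur, n)]) x = (R ++ [(cur, n)]) ++ [(x, 1)] from by
        simp [cl_stepB, Ne.symm hx], cl_ext, if_neg hx]
      rw [show (R ++ [(cur, n)]) ++ [(x, 1)] = R ++ ((cur, n) :: ([] ++ [(x, 1)])) from by simp]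
      rw [show R ++ ((cur, n) :: ([] ++ [(x, 1)])) = (R ++ [(cur, n)]) ++ [(x, 1)] from by simp]
      rw [ih (R ++ [(cur, n)]) x 1]
      simp

theorem cl_expK_ext (l : List Int) : ∀ (cur : Int) (n k : Nat),
    cl_expK k (cl_ext cur n l) = List.replicate n (k : Int) ++ cl_g cur (k : Int) l := by
  induction l with
  | nil => intro cur n k; simp [cl_ext, cl_expK, cl_g]
  | cons x xs ih =>
    intro cur n k
    by_cases hx : x = cur
    · rw [cl_ext, if_pos hx, ih, cl_g]
      rw [if_neg (by simp [hx])]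
      have : List.replicate (n + 1) ((k : Nat) : Int) =
          List.replicate n ((k : Nat) : Int) ++ [(k : Int)] := by
        simp [List.replicate_succ']
      rw [this, List.append_assoc]
      simp
    · rw [cl_ext, if_neg hx, cl_expK, ih, cl_g, if_pos hx]
      push_cast
      simp

theorem cl_expand_fold (rs : List (Int × Nat)) : ∀ (acc : List Int) (k : Nat),
    ((rs.zipIdx k).foldl
      (fun (out : List Int) (p : (Int × Nat) × Nat) => out ++ List.replicate p.1.2 (p.2 : Int))
      acc) = acc ++ cl_expK k rs := by
  induction rs with
  | nil => intro acc k; simp [cl_expK]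
  | cons r rs ih =>
    intro acc k
    obtain ⟨v, n⟩ := r
    simp [List.zipIdx_cons, cl_expK, ih, List.append_assoc]

-- ===== VERDICT (by name: the statement is the Claim_ definition above) =====
theorem change_labels_spec : Claim_equal_change_labels := by
  intro labels _ hpre
  unfold Spec_change_labels
  obtain ⟨h, rest, rfl⟩ : ∃ h rest, labels = h :: rest := by
    cases labels with
    | nil => exact absurd rfl hpre
    | cons a l => exact ⟨a, l, rfl⟩
  unfold change_labels change_labels_alt cl_buildRuns
  simp only [List.head?_cons]
  rw [cl_foldA]
  rw [show ((h :: rest).foldl cl_stepB []) = ([] : List (Int × Nat)) ++ cl_ext h 1 rest from by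
    rw [List.foldl_cons, show cl_stepB [] h = [] ++ [(h, 1)] from by simp [cl_stepB]]
    exact cl_foldB rest [] h 1]
  rw [List.nil_append, cl_expand_fold]
  simp only [List.nil_append]
  rw [cl_expK_ext]
  simp [cl_g, List.replicate]
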